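-- pv_equiv track=rewrite | github.com/bmccann6/computational_study_first_paper | scrap2.py | calculate_backloading_stack_values
-- ===== SOURCE A (Python) =====
-- def calculate_backloading_stack_values(resource_set_dict, item_vals, capacities):
--     hider_resources_sorted = sorted(resource_set_dict.items(), key=lambda x: item_vals[x[0]])
--     local_copy_capacities = capacities.copy()
--     backloading_stack_values = {i: 0 for i in range(len(capacities))}
--     i = 0
--     while local_copy_capacities and hider_resources_sorted:
--         if local_copy_capacities[0] == 0:
--             local_copy_capacities.pop(0)
--             i += 1
--             continue
--         if hider_resources_sorted[0][1] == 0: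
--             hider_resources_sorted.pop(0)
--             continue
--         assignment_amount = min(local_copy_capacities[0], hider_resources_sorted[0][1])
--         item_name = hider_resources_sorted[0][0]
--         item_value = item_vals[item_name]
--         backloading_stack_values[i] += assignment_amount * item_value
--         local_copy_capacities[0] -= assignment_amount
--         hider_resources_sorted[0] = (hider_resources_sorted[0][0], hider_resources_sorted[0][1] - assignment_amount)
--     return backloading_stack_values
-- ===== SOURCE B (Python) =====
-- def calculate_backloading_stack_values(resource_set_dict, item_vals, capacities):
--     # Stacks drive the outer loop; a resource index + carried remainder replaces the pop(0) merge.
--     resources = sorted(resource_set_dict.items(), key=lambda x: item_vals[x[0]])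
--     n = len(resources)
--     ri = 0
--     rem = resources[0][1] if resources else 0
--     result = {}
--     for idx, cap in enumerate(capacities):
--         cap_left = cap
--         total = 0
--         while cap_left != 0 and ri < n:
--             if rem == 0:
--                 ri += 1
--                 if ri < n:
--                     rem = resources[ri][1]
--                 continue
--             take = min(cap_left, rem)
--             total += take * item_vals[resources[ri][0]]
--             cap_left -= take
--             rem -= take
--         result[idx] = total
--     return result
-- ===== Notes on version B (the rewrite author's own statement) =====
-- stated objective: alternative
-- what changed: B makes the capacities the outer driver (enumerate over stacks, per-stack inner while with a resource index pointer and a carried remainder) instead of A's flat symmetric while loop that pops heads off both lists and tracks the stack index manually; Pre_ only excludes resource names missing from item_vals, where both programs raise KeyError.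
import Mathlib
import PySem

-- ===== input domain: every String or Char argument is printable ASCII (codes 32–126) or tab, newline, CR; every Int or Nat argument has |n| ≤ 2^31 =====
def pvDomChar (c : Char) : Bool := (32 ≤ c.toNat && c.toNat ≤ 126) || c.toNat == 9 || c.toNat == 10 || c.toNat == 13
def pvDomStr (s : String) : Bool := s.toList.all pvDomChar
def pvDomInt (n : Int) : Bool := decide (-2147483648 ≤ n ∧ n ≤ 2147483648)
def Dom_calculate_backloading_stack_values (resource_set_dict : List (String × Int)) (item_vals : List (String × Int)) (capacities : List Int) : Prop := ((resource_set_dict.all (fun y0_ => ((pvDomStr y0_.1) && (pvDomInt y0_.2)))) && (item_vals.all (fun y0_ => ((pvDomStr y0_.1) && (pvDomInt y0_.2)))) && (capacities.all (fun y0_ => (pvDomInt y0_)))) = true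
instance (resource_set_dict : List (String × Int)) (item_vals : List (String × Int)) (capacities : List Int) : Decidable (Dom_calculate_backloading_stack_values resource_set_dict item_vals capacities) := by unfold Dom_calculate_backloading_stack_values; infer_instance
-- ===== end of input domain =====

-- B reorganises the greedy pass: capacities drive the outer loop with an index pointer and
-- carried remainder over the value-sorted resources, instead of A's head-popping merge loop.

-- shared helpers (dict lookup item_vals[name]; first match per the assoc-list convention)
def pvLookup (iv : List (String × Int)) (name : String) : Int :=
  (((iv.find? (fun p => p.1 == name)).map (·.2))).getD 0

-- ===== PORT A =====
-- d[i] += v on the result dict (key always present): first-match in-place update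
def pvAddAt : List (Int × Int) → Int → Int → List (Int × Int)
  | [], _, _ => []
  | (k', x) :: rest, k, v =>
    if k' = k then (k', x + v) :: rest else (k', x) :: pvAddAt rest k v

-- A's while loop over (local_copy_capacities, hider_resources_sorted, i, backloading_stack_values)
def pvA_loop (iv : List (String × Int)) : List Int → List (String × Int) → Nat → List (Int × Int) → List (Int × Int)
  | [], _, _, out => out
  | _ :: _, [], _, out => out
  | c :: cs, (name, amt) :: rs, i, out =>
    if c = 0 then pvA_loop iv cs ((name, amt) :: rs) (i + 1) out
    else if amt = 0 then pvA_loop iv (c :: cs) rs i out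
    else
      let a := min c amt
      pvA_loop iv ((c - a) :: cs) ((name, amt - a) :: rs) i
        (pvAddAt out (Int.ofNat i) (a * pvLookup iv name))
  termination_by caps res _ _ =>
    3 * (caps.length + res.length)
      + (if caps.headD 1 = 0 then 0 else 1)
      + (if (res.headD ("", 1)).2 = 0 then 0 else 1)
  decreasing_by
  · simp only [List.headD, List.length_cons]; split_ifs <;> omega
  · simp only [List.headD, List.length_cons]; split_ifs <;> omega
  · simp only [List.headD, List.length_cons]
    rcases min_choice c amt with h | h <;> simp only [h] <;> split_ifs <;> omega

def calculate_backloading_stack_values (resource_set_dict : List (String × Int)) (item_vals : List (String × Int)) (capacities : List Int) : List (Int × Int) :=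
  let hider_resources_sorted := PySem.List.sorted resource_set_dict (fun x => pvLookup item_vals x.1)
  let init := (List.range capacities.length).map (fun (j : Nat) => ((j : Int), (0 : Int)))
  pvA_loop item_vals capacities hider_resources_sorted 0 init

-- ===== PORT B =====
-- B's inner while: consume resources from index ri (current remainder rem) into one stack
def pvB_consume (iv : List (String × Int)) (res : List (String × Int)) (n : Nat) (ri : Nat) (rem : Int) (capLeft : Int) (total : Int) : Int × Nat × Int :=
  if capLeft = 0 ∨ n ≤ ri then (total, ri, rem)
  else if rem = 0 then
    let ri' := ri + 1
    let rem' := if ri' < n then ((res[ri']?).getD ("", 0)).2 else rem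
    pvB_consume iv res n ri' rem' capLeft total
  else
    let take := min capLeft rem
    pvB_consume iv res n ri (rem - take) (capLeft - take)
      (total + take * pvLookup iv ((res[ri]?).getD ("", 0)).1)
  termination_by 3 * (n - ri) + (if rem = 0 then 0 else 1) + (if capLeft = 0 then 0 else 1)
  decreasing_by
  · split_ifs <;> omega
  · rcases min_choice capLeft rem with h | h <;> simp only [h] <;> split_ifs <;> omega

def calculate_backloading_stack_values_alt (resource_set_dict : List (String × Int)) (item_vals : List (String × Int)) (capacities : List Int) : List (Int × Int) :=
  let resources := PySem.List.sorted resource_set_dict (fun x => pvLookup item_vals x.1)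
  let n := resources.length
  let rem0 : Int := match resources with | [] => 0 | (_, a) :: _ => a
  (capacities.foldl
    (fun (st : List (Int × Int) × Nat × Nat × Int) cap =>
      let r := pvB_consume item_vals resources n st.2.2.1 st.2.2.2 cap 0
      (st.1 ++ [((st.2.1 : Int), r.1)], st.2.1 + 1, r.2.1, r.2.2))
    ([], 0, 0, rem0)).1

-- ===== PRECONDITION & SPEC =====
-- Pre_ excludes exactly the inputs where Python A raises KeyError: a resource name absent from item_vals.
def Pre_calculate_backloading_stack_values (resource_set_dict : List (String × Int)) (item_vals : List (String × Int)) (capacities : List Int) : Prop :=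
  resource_set_dict.all (fun p => (item_vals.find? (fun q => q.1 == p.1)).isSome) = true
instance (resource_set_dict : List (String × Int)) (item_vals : List (String × Int)) (capacities : List Int) : Decidable (Pre_calculate_backloading_stack_values resource_set_dict item_vals capacities) := by unfold Pre_calculate_backloading_stack_values; infer_instance

def pvWitness_calculate_backloading_stack_values : (List (String × Int)) × (List (String × Int)) × List Int :=
  ([("a", 2), ("b", 3)], [("a", 5), ("b", 1)], [1, 4, 0])

def Spec_calculate_backloading_stack_values (resource_set_dict : List (String × Int)) (item_vals : List (String × Int)) (capacities : List Int) (out : List (Int × Int)) : Prop := out = calculate_backloading_stack_values_alt resource_set_dict item_vals capacities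
instance (resource_set_dict : List (String × Int)) (item_vals : List (String × Int)) (capacities : List Int) (out : List (Int × Int)) : Decidable (Spec_calculate_backloading_stack_values resource_set_dict item_vals capacities out) := by unfold Spec_calculate_backloading_stack_values; infer_instance

-- ===== CLAIM (what is proved, stated in full; the proofs are below) =====
def Claim_equal_calculate_backloading_stack_values : Prop := ∀ (resource_set_dict : List (String × Int)) (item_vals : List (String × Int)) (capacities : List Int), Dom_calculate_backloading_stack_values resource_set_dict item_vals capacities → Pre_calculate_backloading_stack_values resource_set_dict item_vals capacities → Spec_calculate_backloading_stack_values resource_set_dict item_vals capacities (calculate_backloading_stack_values resource_set_dict item_vals capacities)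

-- ===== LEMMAS AND PROOFS =====

-- reference consumption of one capacity c over the resource list, accumulating into t
def pvConsume (iv : List (String × Int)) : List (String × Int) → Int → Int → Int × List (String × Int)
  | res, c, t =>
    if c = 0 then (t, res)
    else
      match res with
      | [] => (t, [])
      | (name, amt) :: rs =>
        if amt = 0 then pvConsume iv rs c t
        else
          let a := min c amt
          pvConsume iv ((name, amt - a) :: rs) (c - a) (t + a * pvLookup iv name)
  termination_by res c _ =>
    3 * res.length + (if (res.headD ("", 1)).2 = 0 then 0 else 1) + (if c = 0 then 0 else 1)
  decreasing_by
  · simp only [List.headD, List.length_cons]; split_ifs <;> omega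
  · simp only [List.headD, List.length_cons]
    rcases min_choice c amt with h | h <;> simp only [h] <;> split_ifs <;> omega

-- per-stack totals, in order
def pvSpecGo (iv : List (String × Int)) : List Int → List (String × Int) → List Int
  | [], _ => []
  | c :: cs, res =>
    (pvConsume iv res c 0).1 :: pvSpecGo iv cs (pvConsume iv res c 0).2

-- attach keys i, i+1, … to the totals
def pvZipT (i : Nat) : List Int → List (Int × Int)
  | [] => []
  | t :: ts => ((i : Int), t) :: pvZipT (i + 1) ts

-- the virtual remaining-resources list seen through B's pointer (ri, rem)
def pvVirt (res : List (String × Int)) (ri : Nat) (rem : Int) : List (String × Int) :=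
  match res.drop ri with
  | [] => []
  | p :: rs => (p.1, rem) :: rs

-- d[i] += v hits the (i, x) entry when no earlier key equals i
theorem pvAddAt_structured (pre rest : List (Int × Int)) (k x v : Int)
    (h : ∀ p ∈ pre, p.1 ≠ k) :
    pvAddAt (pre ++ (k, x) :: rest) k v = pre ++ (k, x + v) :: rest := by
  induction pre with
  | nil => simp [pvAddAt]
  | cons q pre ih =>
    obtain ⟨k1, v1⟩ := q
    have hq : k1 ≠ k := h (k1, v1) (by simp)
    simp only [List.cons_append, pvAddAt, if_neg hq]
    rw [ih (fun p hp => h p (by simp [hp]))]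

-- one capacity of A's loop = pvConsume, with the dict entry as accumulator
theorem pvA_split (iv : List (String × Int)) (res : List (String × Int)) (c x : Int) :
    ∀ (cs : List Int) (i : Nat) (pre rest : List (Int × Int)),
      (∀ p ∈ pre, p.1 ≠ (i : Int)) →
      pvA_loop iv (c :: cs) res i (pre ++ ((i : Int), x) :: rest)
        = pvA_loop iv cs (pvConsume iv res c x).2 (i + 1)
            (pre ++ ((i : Int), (pvConsume iv res c x).1) :: rest) := by
  induction res, c, x using pvConsume.induct iv with
  | case1 res t =>
    intro cs i pre rest hpre
    rw [pvConsume.eq_def]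
    simp only [reduceIte]
    cases res with
    | nil =>
      rw [pvA_loop]
      cases cs <;> rw [pvA_loop]
    | cons p rs =>
      obtain ⟨name, amt⟩ := p
      rw [pvA_loop]
      simp
  | case2 c t hc =>
    intro cs i pre rest hpre
    rw [pvConsume]
    simp only [if_neg hc]
    cases cs <;> rw [pvA_loop, pvA_loop]
  | case3 c t hc name tail ih =>
    intro cs i pre rest hpre
    rw [pvConsume]
    simp only [if_neg hc]
    rw [pvA_loop]
    simp only [if_neg hc]
    exact ih cs i pre rest hpre
  | case4 c t hc name amt tail hamt hmin ih =>
    intro cs i pre rest hpre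
    rw [pvConsume]
    simp only [if_neg hc, if_neg hamt]
    rw [pvA_loop]
    simp only [if_neg hc, if_neg hamt, Int.ofNat_eq_natCast]
    rw [pvAddAt_structured pre rest _ t _ hpre]
    exact ih cs i pre rest hpre

-- A's whole loop fills keys i, i+1, … with the pvSpecGo totals
theorem pvA_run (iv : List (String × Int)) :
    ∀ (caps : List Int) (res : List (String × Int)) (i : Nat) (pre : List (Int × Int)),
      (∀ p ∈ pre, p.1 < (i : Int)) →
      pvA_loop iv caps res i (pre ++ (List.range caps.length).map (fun j => (((i + j : Nat) : Int), (0 : Int))))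
        = pre ++ pvZipT i (pvSpecGo iv caps res) := by
  intro caps
  induction caps with
  | nil =>
    intro res i pre hpre
    rw [pvSpecGo, pvZipT]
    simp only [List.length_nil, List.range_zero, List.map_nil, List.append_nil]
    rw [pvA_loop.eq_def]
  | cons c cs ih =>
    intro res i pre hpre
    have hrange : (List.range (c :: cs).length).map (fun j => (((i + j : Nat) : Int), (0 : Int)))
        = ((i : Int), (0 : Int)) :: (List.range cs.length).map (fun j => ((((i + 1) + j : Nat) : Int), (0 : Int))) := by
      rw [List.length_cons, List.range_succ_eq_map, List.map_cons, List.map_map]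
      simp only [Nat.add_zero]
      congr 1
      apply List.map_congr_left
      intro j _
      simp only [Function.comp_apply]
      congr 2
      omega
    rw [hrange]
    rw [pvA_split iv res c 0 cs i pre _ (fun p hp => by have := hpre p hp; omega)]
    have hmid : pre ++ ((i : Int), (pvConsume iv res c 0).1)
          :: (List.range cs.length).map (fun j => ((((i + 1) + j : Nat) : Int), (0 : Int)))
        = (pre ++ [((i : Int), (pvConsume iv res c 0).1)])
          ++ (List.range cs.length).map (fun j => ((((i + 1) + j : Nat) : Int), (0 : Int))) := by
      simp
    rw [hmid]
    rw [ih (pvConsume iv res c 0).2 (i + 1) (pre ++ [((i : Int), (pvConsume iv res c 0).1)])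
        (by
          intro p hp
          rcases List.mem_append.mp hp with h | h
          · have := hpre p h; push_cast; omega
          · simp at h; rw [h]; push_cast; omega)]
    rw [pvSpecGo, pvZipT]
    simp

theorem pvA_top (rsd iv : List (String × Int)) (caps : List Int) :
    calculate_backloading_stack_values rsd iv caps
      = pvZipT 0 (pvSpecGo iv caps (PySem.List.sorted rsd (fun x => pvLookup iv x.1))) := by
  unfold calculate_backloading_stack_values
  have h := pvA_run iv caps (PySem.List.sorted rsd (fun x => pvLookup iv x.1)) 0 []
    (by intro p hp; simp at hp)
  simp only [List.nil_append, Nat.zero_add] at h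
  exact h

-- B's inner while loop tracks pvConsume through the (ri, rem) pointer
theorem pvB_ptr (iv res : List (String × Int)) :
    ∀ (ri : Nat) (rem c t : Int), ri ≤ res.length → (res.length ≤ ri → rem = 0) →
      ∃ ri' rem',
        pvB_consume iv res res.length ri rem c t
            = ((pvConsume iv (pvVirt res ri rem) c t).1, ri', rem')
          ∧ pvVirt res ri' rem' = (pvConsume iv (pvVirt res ri rem) c t).2
          ∧ ri' ≤ res.length ∧ (res.length ≤ ri' → rem' = 0) := by
  intro ri rem c t
  induction ri, rem, c, t using pvB_consume.induct iv res res.length with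
  | case1 ri rem c t h =>
    intro hle hinv
    refine ⟨ri, rem, ?_⟩
    rw [pvB_consume, if_pos h]
    rcases h with hc | hn
    · rw [pvConsume.eq_def]
      dsimp only
      rw [if_pos hc]
      exact ⟨rfl, rfl, hle, hinv⟩
    · have hri : ri = res.length := le_antisymm hle hn
      have hrem : rem = 0 := hinv hn
      have hv : pvVirt res ri rem = [] := by
        unfold pvVirt
        rw [hri, List.drop_length]
      rw [hv]
      have hcn : pvConsume iv [] c t = (t, []) := by
        rw [pvConsume.eq_def]; dsimp only; split <;> rfl
      rw [hcn]
      exact ⟨rfl, by simpa using hv, hle, hinv⟩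
  | case2 ri c t h ri1 rem1 ih =>
    intro hle hinv
    have hc : c ≠ 0 := fun hc => h (Or.inl hc)
    have hri : ri < res.length := by omega
    have hdrop := List.drop_eq_getElem_cons hri
    have hv : pvVirt res ri 0 = (res[ri].1, (0 : Int)) :: res.drop (ri + 1) := by
      unfold pvVirt; rw [hdrop]
    have hskip : pvConsume iv (pvVirt res ri 0) c t = pvConsume iv (res.drop (ri + 1)) c t := by
      rw [hv, pvConsume.eq_def]
      simp [hc]
    have hsuffix : pvVirt res (ri + 1)
        (if h : ri + 1 < res.length then ((res[ri+1]?).getD ("", 0)).2 else 0)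
        = res.drop (ri + 1) := by
      by_cases h1 : ri + 1 < res.length
      · unfold pvVirt
        rw [List.drop_eq_getElem_cons h1, dif_pos h1]
        rw [List.getElem?_eq_getElem h1]
        rfl
      · have : res.length ≤ ri + 1 := by omega
        unfold pvVirt
        rw [List.drop_eq_nil_of_le this, dif_neg h1]
    obtain ⟨ri', rem', heq, hvv, hle', hinv'⟩ := ih (show ri + 1 ≤ res.length by omega)
      (by
        intro hcontra
        show (if h : ri + 1 < res.length then ((res[ri+1]?).getD ("", 0)).2 else (0:Int)) = 0
        rw [dif_neg (by omega)])
    have hs2 : pvVirt res ri1 rem1 = List.drop (ri + 1) res := hsuffix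
    refine ⟨ri', rem', ?_, ?_, hle', hinv'⟩
    · rw [pvB_consume, if_neg h]
      simp only [reduceIte]
      show pvB_consume iv res res.length ri1 rem1 c t = _
      rw [heq, hs2, ← hskip]
    · rw [hvv, hs2, ← hskip]
  | case3 ri rem c t h hrem htake ih =>
    intro hle hinv
    have hc : c ≠ 0 := fun hc => h (Or.inl hc)
    have hri : ri < res.length := by omega
    have hdrop := List.drop_eq_getElem_cons hri
    have hv : pvVirt res ri rem = (res[ri].1, rem) :: res.drop (ri + 1) := by
      unfold pvVirt; rw [hdrop]
    have hstep : pvConsume iv (pvVirt res ri rem) c t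
        = pvConsume iv (pvVirt res ri (rem - min c rem)) (c - min c rem)
            (t + min c rem * pvLookup iv res[ri].1) := by
      rw [hv, pvConsume.eq_def]
      simp only [if_neg hc, if_neg hrem]
      congr 1
      unfold pvVirt
      rw [hdrop]
    obtain ⟨ri', rem', heq, hvv, hle', hinv'⟩ := ih hle (by intro hcontra; omega)
    refine ⟨ri', rem', ?_, ?_, hle', hinv'⟩
    · rw [pvB_consume, if_neg h, if_neg hrem]
      rw [heq, hstep]
      simp only [List.getElem?_eq_getElem hri, Option.getD_some]
      rfl
    · rw [hvv, hstep]
      simp only [List.getElem?_eq_getElem hri, Option.getD_some]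
      rfl

theorem pvB_fold (iv res : List (String × Int)) :
    ∀ (caps : List Int) (acc : List (Int × Int)) (idx ri : Nat) (rem : Int),
      ri ≤ res.length → (res.length ≤ ri → rem = 0) →
      (caps.foldl
        (fun (st : List (Int × Int) × Nat × Nat × Int) cap =>
          let r := pvB_consume iv res res.length st.2.2.1 st.2.2.2 cap 0
          (st.1 ++ [((st.2.1 : Int), r.1)], st.2.1 + 1, r.2.1, r.2.2))
        (acc, idx, ri, rem)).1
        = acc ++ pvZipT idx (pvSpecGo iv caps (pvVirt res ri rem)) := by
  intro caps
  induction caps with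
  | nil =>
    intro acc idx ri rem hle hinv
    rw [pvSpecGo, pvZipT]
    simp
  | cons cap caps ih =>
    intro acc idx ri rem hle hinv
    obtain ⟨ri', rem', heq, hvv, hle', hinv'⟩ := pvB_ptr iv res ri rem cap 0 hle hinv
    rw [List.foldl_cons]
    dsimp only
    rw [heq]
    rw [ih (acc ++ [((idx : Int), (pvConsume iv (pvVirt res ri rem) cap 0).1)]) (idx + 1) ri' rem' hle' hinv']
    rw [hvv]
    rw [pvSpecGo, pvZipT]
    simp

theorem pvB_top_aux (iv : List (String × Int)) (caps : List Int) (resS : List (String × Int)) :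
    (caps.foldl
      (fun (st : List (Int × Int) × Nat × Nat × Int) cap =>
        let r := pvB_consume iv resS resS.length st.2.2.1 st.2.2.2 cap 0
        (st.1 ++ [((st.2.1 : Int), r.1)], st.2.1 + 1, r.2.1, r.2.2))
      ([], 0, 0, (match resS with | [] => (0 : Int) | (_, a) :: _ => a))).1
      = pvZipT 0 (pvSpecGo iv caps resS) := by
  cases resS with
  | nil =>
    rw [pvB_fold iv [] caps [] 0 0 0 (by simp) (fun _ => rfl)]
    rfl
  | cons p rs =>
    obtain ⟨name, amt⟩ := p
    rw [pvB_fold iv ((name, amt) :: rs) caps [] 0 0 amt (by simp) (by intro hcontra; simp at hcontra)]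
    rfl

theorem pvB_top (rsd iv : List (String × Int)) (caps : List Int) :
    calculate_backloading_stack_values_alt rsd iv caps
      = pvZipT 0 (pvSpecGo iv caps (PySem.List.sorted rsd (fun x => pvLookup iv x.1))) := by
  exact pvB_top_aux iv caps (PySem.List.sorted rsd (fun x => pvLookup iv x.1))

-- ===== VERDICT (by name: the statement is the Claim_ definition above) =====
theorem calculate_backloading_stack_values_spec : Claim_equal_calculate_backloading_stack_values := by
  intro rsd iv caps _ _
  unfold Spec_calculate_backloading_stack_values
  rw [pvA_top, pvB_top]
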